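-- pv_equiv track=rewrite | github.com/Educorreia932/FCUP-BINF | Assignments/Assignment 3/sequence.py | all_proteins_rf_modified
-- ===== SOURCE A (Python) =====
-- def all_proteins_rf_modified (aa_seq):
--     """
--     Similar to `all_proteins_rf`, but for a given region, if
--     alternative start codons are found, it selects the longest ORF
--     """
--     aa_seq = aa_seq.upper()
--     current_prot = []
--     proteins = []
--     for aa in aa_seq:
--         if aa == "_":
--             if current_prot:
--                 # MODIFICATION —- Append just the protein with maximum size
--                 proteins.append(max(current_prot, key=len))
--             current_prot = []
--         else:
--             if aa == "M":
--                 current_prot.append("")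
--             for i in range(len(current_prot)):
--                 current_prot[i] += aa
--     return proteins
-- ===== SOURCE B (Python) =====
-- def all_proteins_rf_modified(aa_seq):
--     s = aa_seq.upper()
--     proteins = []
--     start = None
--     for i, c in enumerate(s):
--         if c == "_":
--             if start is not None:
--                 proteins.append(s[start:i])
--             start = None
--         elif c == "M" and start is None:
--             start = i
--     return proteins
-- ===== Notes on version B (the rewrite author's own statement) =====
-- stated objective: faster
-- what changed: Instead of growing every open candidate protein character by character and taking the longest at each stop (quadratic in region length), B makes a single pass recording only the index of the first start-codon residue in each stop-delimited region and slices the string once per stop; the candidate started at the first start residue is always the strictly longest, which is exactly the one Python's max with key=len picks.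
import Mathlib
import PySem

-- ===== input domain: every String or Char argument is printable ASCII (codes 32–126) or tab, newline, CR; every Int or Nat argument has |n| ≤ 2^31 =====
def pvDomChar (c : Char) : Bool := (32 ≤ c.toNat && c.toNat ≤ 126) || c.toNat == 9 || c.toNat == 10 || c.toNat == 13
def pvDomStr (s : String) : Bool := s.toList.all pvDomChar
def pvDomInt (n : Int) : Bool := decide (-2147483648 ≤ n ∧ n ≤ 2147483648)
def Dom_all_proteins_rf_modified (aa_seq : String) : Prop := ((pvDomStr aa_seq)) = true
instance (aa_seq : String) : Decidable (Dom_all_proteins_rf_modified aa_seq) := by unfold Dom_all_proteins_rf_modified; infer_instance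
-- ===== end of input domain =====

-- B replaces A's quadratic per-character growth of every open candidate string by a single pass
-- recording only the index of the first start residue of each stop-delimited region and slicing once per stop (objective: faster).


-- ===== PORT A =====
-- Python strings under construction are carried as List Char (PySem.Chars models Python
-- string ops exactly); each finished protein is packed with String.mk at the end.
def pvStepA (st : List (List Char) × List (List Char)) (aa : Char) :
    List (List Char) × List (List Char) :=
  let cur := st.1
  let prots := st.2
  if aa = '_' then
    (([] : List (List Char)),
     if cur ≠ [] then
       match PySem.List.max? cur (fun p => p.length) with
       | some m => prots ++ [m]
       | none => prots
     else prots)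
  else
    let cur := if aa = 'M' then cur ++ [([] : List Char)] else cur
    (cur.map (fun p => p ++ [aa]), prots)


def all_proteins_rf_modified (aa_seq : String) : List String :=
  (((PySem.Chars.upper aa_seq.toList).foldl pvStepA ([], [])).2).map String.mk

-- ===== PORT B =====
def pvStepB (s : List Char) (st : List (List Char) × Option Int) (p : Int × Char) :
    List (List Char) × Option Int :=
  let prots := st.1
  let start? := st.2
  if p.2 = '_' then
    match start? with
    | some j => (prots ++ [PySem.List.slice s (some j) (some p.1)], none)
    | none => (prots, none)
  else if p.2 = 'M' ∧ start? = none then (prots, some p.1)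
  else (prots, start?)

def all_proteins_rf_modified_alt (aa_seq : String) : List String :=
  let s := PySem.Chars.upper aa_seq.toList
  (((PySem.List.enumerate s).foldl (pvStepB s) ([], none)).1).map String.mk

-- ===== PRECONDITION & SPEC =====
def Spec_all_proteins_rf_modified (aa_seq : String) (out : List String) : Prop := out = all_proteins_rf_modified_alt aa_seq
instance (aa_seq : String) (out : List String) : Decidable (Spec_all_proteins_rf_modified aa_seq out) := by unfold Spec_all_proteins_rf_modified; infer_instance

-- ===== CLAIM (what is proved, stated in full; the proofs are below) =====
def Claim_equal_all_proteins_rf_modified : Prop := ∀ (aa_seq : String), Dom_all_proteins_rf_modified aa_seq → Spec_all_proteins_rf_modified aa_seq (all_proteins_rf_modified aa_seq)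

-- ===== LEMMAS AND PROOFS =====

lemma pv_foldl_max_stay : ∀ (t : List (List Char)) (m : List Char),
    (∀ p ∈ t, p.length < m.length) →
    t.foldl (fun acc x => match acc with
      | none => some x
      | some m => if m.length < x.length then some x else some m) (some m) = some m := by
  intro t
  induction t with
  | nil => intro m _; rfl
  | cons x xs ih =>
    intro m hk
    simp only [List.foldl_cons]
    rw [if_neg (by exact not_lt.mpr (le_of_lt (hk x (by simp))))]
    exact ih m (fun p hp => hk p (by simp [hp]))

lemma max?_cons_of_lt (h : List Char) (t : List (List Char))
    (hk : ∀ p ∈ t, p.length < h.length) :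
    PySem.List.max? (h :: t) (fun p => p.length) = some h := by
  have := pv_foldl_max_stay t h hk
  simp only [PySem.List.max?, List.foldl_cons]
  convert this using 2
  exact funext fun acc => funext fun x => by cases acc <;> rfl

def pvInv (u : List Char) (i : Nat) (cur : List (List Char)) (start? : Option Nat) : Prop :=
  match start? with
  | none => cur = []
  | some j => j < i ∧ ∃ t, cur = ((u.drop j).take (i - j)) :: t ∧ ∀ p ∈ t, p.length < i - j

lemma loop_eq (u : List Char) : ∀ (rest : List Char) (i : Nat), rest = u.drop i →
    ∀ (cur : List (List Char)) (start? : Option Nat) (prots : List (List Char)),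
    pvInv u i cur start? →
    (rest.foldl pvStepA (cur, prots)).2 =
      ((PySem.List.enumerate rest (i : Int)).foldl (pvStepB u) (prots, start?.map Int.ofNat)).1 := by
  intro rest
  induction rest with
  | nil => intro i _ cur start? prots _; simp [PySem.List.enumerate]
  | cons c rest' ih =>
    intro i hrest cur start? prots hinv
    have hdropi : u.drop i = c :: rest' := hrest.symm
    have hi_lt : i < u.length := by
      by_contra h
      have : u.drop i = [] := List.drop_eq_nil_of_le (by omega)
      simp [this] at hdropi
    have hrest' : rest' = u.drop (i + 1) := by
      have h1 : u.drop (i+1) = (u.drop i).drop 1 := by rw [List.drop_drop]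
      simp [h1, hdropi]
    have hui : u[i]? = some c := by
      have h0 : (u.drop i)[0]? = some c := by simp [hdropi]
      simpa [List.getElem?_drop] using h0
    have henum : PySem.List.enumerate (c :: rest') (i : Int)
        = ((i : Int), c) :: PySem.List.enumerate rest' ((i + 1 : Nat) : Int) := by
      have : ((i : Int)) + 1 = ((i + 1 : Nat) : Int) := by push_cast; ring
      rw [← this]
      rfl
    rw [henum, List.foldl_cons, List.foldl_cons]
    by_cases hc : c = '_'
    · subst hc
      cases start? with
      | none =>
        have hcur : cur = [] := hinv
        subst hcur
        have eA : pvStepA ([], prots) '_' = ([], prots) := by simp [pvStepA]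
        have eB : pvStepB u (prots, none) ((i : Int), '_') = (prots, none) := by simp [pvStepB]
        rw [eA]
        simpa using ih (i+1) hrest' [] none prots rfl
      | some j =>
        obtain ⟨hji, t, hcur, hk⟩ := hinv
        subst hcur
        have hlen : ((u.drop j).take (i - j)).length = i - j := by
          simp [List.length_take, List.length_drop]
          omega
        have hmax : PySem.List.max? (((u.drop j).take (i - j)) :: t) (fun p => p.length)
            = some ((u.drop j).take (i - j)) :=
          max?_cons_of_lt _ _ (fun p hp => by rw [hlen]; exact hk p hp)
        have hslice : PySem.List.slice u (some (j : Int)) (some (i : Int))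
            = (u.drop j).take (i - j) := PySem.List.slice_natCast u j i
        have eA : pvStepA (((u.drop j).take (i - j)) :: t, prots) '_'
            = ([], prots ++ [(u.drop j).take (i - j)]) := by
          simp [pvStepA, hmax]
        have eB : pvStepB u (prots, some (j : Int)) ((i : Int), '_')
            = (prots ++ [(u.drop j).take (i - j)], none) := by
          simp [pvStepB, hslice]
        rw [eA]
        simpa [eB] using ih (i+1) hrest' [] none (prots ++ [(u.drop j).take (i - j)]) rfl
    ·
      cases start? with
      | none =>
        have hcur : cur = [] := hinv
        subst hcur
        by_cases hM : c = 'M'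
        · subst hM
          have eA : pvStepA ([], prots) 'M' = ([['M']], prots) := by
            simp [pvStepA]
          have eB : pvStepB u (prots, none) ((i : Int), 'M') = (prots, some (i : Int)) := by
            simp [pvStepB]
          have hinv' : pvInv u (i+1) [['M']] (some i) := by
            refine ⟨by omega, [], ?_, by simp⟩
            have h2 : i + 1 - i = 1 := by omega
            have h3 : (u.drop i).take 1 = ['M'] := by simp [hdropi]
            rw [h2, h3]
          rw [eA]
          simpa [eB] using ih (i+1) hrest' _ (some i) prots hinv'
        · have eA : pvStepA ([], prots) c = ([], prots) := by
            simp [pvStepA, hc, hM]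
          have eB : pvStepB u (prots, none) ((i : Int), c) = (prots, none) := by
            simp [pvStepB, hc, hM]
          rw [eA]
          simpa [eB] using ih (i+1) hrest' [] none prots rfl
      | some j =>
        obtain ⟨hji, t, hcur, hk⟩ := hinv
        subst hcur
        have hgd : (u.drop j)[i - j]? = some c := by
          rw [List.getElem?_drop]
          have hji' : j + (i - j) = i := by omega
          rw [hji']
          exact hui
        have htake : (u.drop j).take (i - j + 1) = (u.drop j).take (i - j) ++ [c] := by
          rw [List.take_add_one]
          simp [hgd]
        have hsub : i + 1 - j = i - j + 1 := by omega
        have eB : pvStepB u (prots, some (j : Int)) ((i : Int), c) = (prots, some (j : Int)) := by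
          simp [pvStepB, hc]
        by_cases hM : c = 'M'
        · subst hM
          have eA : pvStepA (((u.drop j).take (i - j)) :: t, prots) 'M'
              = (((u.drop j).take (i - j) ++ ['M']) :: (t.map (fun p => p ++ ['M']) ++ [['M']]), prots) := by
            simp [pvStepA, hc]
          have hinv' : pvInv u (i+1)
              (((u.drop j).take (i - j) ++ ['M']) :: (t.map (fun p => p ++ ['M']) ++ [['M']]))
              (some j) := by
            refine ⟨by omega, t.map (fun p => p ++ ['M']) ++ [['M']], ?_, ?_⟩
            · rw [hsub, htake]
            · intro p hp
              rw [hsub]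
              rcases List.mem_append.mp hp with hp | hp
              · obtain ⟨q, hq, rfl⟩ := List.mem_map.mp hp
                have := hk q hq
                simp; omega
              · simp at hp
                subst hp
                simp; omega
          rw [eA]
          simpa [eB] using ih (i+1) hrest' _ (some j) prots hinv'
        · have eA : pvStepA (((u.drop j).take (i - j)) :: t, prots) c
              = (((u.drop j).take (i - j) ++ [c]) :: t.map (fun p => p ++ [c]), prots) := by
            simp [pvStepA, hc, hM]
          have hinv' : pvInv u (i+1)
              (((u.drop j).take (i - j) ++ [c]) :: t.map (fun p => p ++ [c])) (some j) := by
            refine ⟨by omega, t.map (fun p => p ++ [c]), ?_, ?_⟩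
            · rw [hsub, htake]
            · intro p hp
              rw [hsub]
              obtain ⟨q, hq, rfl⟩ := List.mem_map.mp hp
              have := hk q hq
              simp; omega
          rw [eA]
          simpa [eB] using ih (i+1) hrest' _ (some j) prots hinv'

theorem pv_ports_eq (aa_seq : String) :
    all_proteins_rf_modified aa_seq = all_proteins_rf_modified_alt aa_seq := by
  unfold all_proteins_rf_modified all_proteins_rf_modified_alt
  have := loop_eq (PySem.Chars.upper aa_seq.toList) (PySem.Chars.upper aa_seq.toList) 0
    (by simp) [] none [] rfl
  exact congrArg (fun l => l.map String.mk) this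

-- ===== VERDICT (by name: the statement is the Claim_ definition above) =====
theorem all_proteins_rf_modified_spec : Claim_equal_all_proteins_rf_modified := by
  intro aa_seq _
  exact (pv_ports_eq aa_seq).symm ▸ rfl
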